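-- pv_equiv track=rewrite | github.com/wesley511/ioi-colony | worker_decision_v2.py | block_has_valid_terminal_structure
-- ===== SOURCE A (Python) =====
-- from typing import Any, Dict, List, Tuple
--
-- def find_block_line_index(lines: List[str], prefix: str) -> int:
--     for idx, line in enumerate(lines):
--         if line.strip().startswith(prefix):
--             return idx
--     return -1
--
-- def block_has_valid_terminal_structure(block: str) -> bool:
--     lines = block.splitlines()
--     rationale_index = find_block_line_index(lines, "- rationale:")
--     last_reinforced_index = find_block_line_index(lines, "- last_reinforced:")
--     status_index = find_block_line_index(lines, "- status:")
--     review_status_index = find_block_line_index(lines, "- review_status:")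
--     last_updated_index = find_block_line_index(lines, "- last_updated:")
--     indexes = [
--         rationale_index,
--         last_reinforced_index,
--         status_index,
--         review_status_index,
--         last_updated_index,
--     ]
--     if any(idx < 0 for idx in indexes):
--         return False
--     return indexes == sorted(indexes)
-- ===== SOURCE B (Python) =====
-- REQUIRED_PREFIXES = [
--     "- rationale:",
--     "- last_reinforced:",
--     "- status:",
--     "- review_status:",
--     "- last_updated:",
-- ]
--
-- def block_has_valid_terminal_structure(block: str) -> bool:
--     seen = []
--     for line in block.splitlines():
--         s = line.strip()
--         for p in REQUIRED_PREFIXES: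
--             if s.startswith(p) and p not in seen:
--                 seen.append(p)
--     return seen == REQUIRED_PREFIXES
-- ===== Notes on version B (the rewrite author's own statement) =====
-- stated objective: simpler
-- what changed: Replaces five full scans for the five prefix indexes plus a sort-and-compare with a single pass that records each required prefix on its first occurrence and compares the encounter sequence to the fixed required order.
import Mathlib
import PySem

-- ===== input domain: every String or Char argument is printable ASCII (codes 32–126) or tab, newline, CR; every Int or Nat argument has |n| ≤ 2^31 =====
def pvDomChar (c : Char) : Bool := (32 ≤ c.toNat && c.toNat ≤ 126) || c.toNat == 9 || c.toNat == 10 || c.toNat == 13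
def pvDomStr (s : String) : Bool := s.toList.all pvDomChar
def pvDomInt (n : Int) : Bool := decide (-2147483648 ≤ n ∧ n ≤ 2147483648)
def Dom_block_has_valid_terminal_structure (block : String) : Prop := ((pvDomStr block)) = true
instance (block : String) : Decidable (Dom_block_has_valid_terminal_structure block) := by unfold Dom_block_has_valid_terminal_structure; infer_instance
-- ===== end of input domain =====

-- B replaces A's five separate scans + sort-of-indexes with one pass recording first encounters; objective: simpler.

-- ===== PORT A =====
def find_block_line_index_go (pre : String) (idx : Nat) : List String → Int
  | [] => -1
  | l :: ls =>
      if PySem.Str.startswith (PySem.Str.strip l) pre then (idx : Int)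
      else find_block_line_index_go pre (idx + 1) ls

def find_block_line_index (lines : List String) (pre : String) : Int :=
  find_block_line_index_go pre 0 lines

def block_has_valid_terminal_structure (block : String) : Bool :=
  let lines := PySem.Str.splitlines block
  let rationale_index := find_block_line_index lines "- rationale:"
  let last_reinforced_index := find_block_line_index lines "- last_reinforced:"
  let status_index := find_block_line_index lines "- status:"
  let review_status_index := find_block_line_index lines "- review_status:"
  let last_updated_index := find_block_line_index lines "- last_updated:"
  let indexes : List Int := [rationale_index, last_reinforced_index, status_index,
    review_status_index, last_updated_index]
  if indexes.any (fun idx => idx < 0) then false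
  else indexes == PySem.List.sorted indexes (fun x => x) false

-- ===== PORT B =====
def requiredPrefixes : List String :=
  ["- rationale:", "- last_reinforced:", "- status:", "- review_status:", "- last_updated:"]

def block_has_valid_terminal_structure_alt (block : String) : Bool :=
  let seen := (PySem.Str.splitlines block).foldl (fun seen line =>
      let s := PySem.Str.strip line
      requiredPrefixes.foldl (fun seen p =>
        if PySem.Str.startswith s p && !(seen.contains p) then seen ++ [p] else seen) seen)
    ([] : List String)
  seen == requiredPrefixes

-- ===== PRECONDITION & SPEC =====
def Spec_block_has_valid_terminal_structure (block : String) (out : Bool) : Prop := out = block_has_valid_terminal_structure_alt block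
instance (block : String) (out : Bool) : Decidable (Spec_block_has_valid_terminal_structure block out) := by unfold Spec_block_has_valid_terminal_structure; infer_instance

-- ===== CLAIM (what is proved, stated in full; the proofs are below) =====
def Claim_equal_block_has_valid_terminal_structure : Prop := ∀ (block : String), Dom_block_has_valid_terminal_structure block → Spec_block_has_valid_terminal_structure block (block_has_valid_terminal_structure block)

-- ===== LEMMAS AND PROOFS =====

-- a line matches a prefix (A's and B's shared test, named for the proofs)
def pMatch (l p : String) : Bool := PySem.Str.startswith (PySem.Str.strip l) p

-- the j-th required prefix
def Rp (j : Nat) : String := requiredPrefixes.getD j ""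

-- first-occurrence index of a matching line
def FO (p : String) : List String → Option Nat
  | [] => none
  | l :: ls => if pMatch l p then some 0 else (FO p ls).map (· + 1)

def isLt (a b : Option Nat) : Prop := ∀ m n, a = some m → b = some n → m < n

-- "the required prefixes from k on all occur, with strictly increasing first occurrences"
def ACond (k : Nat) (ls : List String) : Prop :=
  (∀ j, k ≤ j → j < 5 → (FO (Rp j) ls).isSome = true) ∧
  (∀ j, k ≤ j → j + 1 < 5 → isLt (FO (Rp j) ls) (FO (Rp (j + 1)) ls))

-- B's per-line step and loop, as named functions (definitionally B's foldl body)
def stepB (seen : List String) (line : String) : List String :=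
  let s := PySem.Str.strip line
  requiredPrefixes.foldl (fun seen p =>
    if PySem.Str.startswith s p && !(seen.contains p) then seen ++ [p] else seen) seen

def bodyB (ls : List String) (seen : List String) : List String := ls.foldl stepB seen

theorem alt_eq_bodyB (block : String) :
    block_has_valid_terminal_structure_alt block
      = (bodyB (PySem.Str.splitlines block) [] == requiredPrefixes) := rfl

-- no distinct required prefix is a string-prefix of another (finite check)
theorem req_not_prefix : ∀ i < 5, ∀ j < 5, i ≠ j →
    ¬((Rp i).toList <+: (Rp j).toList) := by decide

-- a line matches at most one required prefix
theorem pMatch_uniq (l : String) (i j : Nat) (hi : i < 5) (hj : j < 5)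
    (h1 : pMatch l (Rp i) = true) (h2 : pMatch l (Rp j) = true) : i = j := by
  by_contra hne
  simp only [pMatch, PySem.Str.startswith_eq, PySem.Chars.startswith_iff] at h1 h2
  rcases le_total (Rp i).toList.length (Rp j).toList.length with hle | hle
  · exact req_not_prefix i hi j hj hne (List.prefix_of_prefix_length_le h1 h2 hle)
  · exact req_not_prefix j hj i hi (fun h => hne h.symm)
      (List.prefix_of_prefix_length_le h2 h1 hle)

theorem FO_spec (p : String) (ls : List String) (n : Nat) (h : FO p ls = some n) :
    n < ls.length ∧ pMatch (ls.getD n "") p = true := by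
  induction ls generalizing n with
  | nil => simp [FO] at h
  | cons l t ih =>
    by_cases hm : pMatch l p = true
    · simp [FO, hm] at h
      subst h; simp [hm]
    · simp [FO, hm] at h
      rcases h with ⟨m, hm', rfl⟩
      have := ih m hm'
      refine ⟨by simp; omega, ?_⟩
      simpa using this.2

-- A's scan computes the first-occurrence index (or -1)
theorem go_eq_FO (p : String) (ls : List String) (n : Nat) :
    find_block_line_index_go p n ls
      = (match FO p ls with | none => -1 | some m => ((n + m : Nat) : Int)) := by
  induction ls generalizing n with
  | nil => simp [find_block_line_index_go, FO]
  | cons l t ih =>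
    by_cases hm : pMatch l p = true
    · simp [find_block_line_index_go, FO, pMatch] at hm ⊢
      simp [hm]
    · simp only [pMatch] at hm
      simp only [find_block_line_index_go, FO, pMatch, hm, if_false, Bool.false_eq_true]
      rw [ih]
      cases h : FO p t with
      | none => simp
      | some m => simp; ring

theorem find_eq_FO (ls : List String) (p : String) :
    find_block_line_index ls p
      = (match FO p ls with | none => -1 | some m => (m : Int)) := by
  have := go_eq_FO p ls 0
  simpa [find_block_line_index] using this

-- stepB characterizations
set_option maxHeartbeats 1000000 in
theorem stepB_unfold (seen : List String) (l : String) :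
    stepB seen l =
      (let s1 := if pMatch l (Rp 0) && !(seen.contains (Rp 0)) then seen ++ [Rp 0] else seen
       let s2 := if pMatch l (Rp 1) && !(s1.contains (Rp 1)) then s1 ++ [Rp 1] else s1
       let s3 := if pMatch l (Rp 2) && !(s2.contains (Rp 2)) then s2 ++ [Rp 2] else s2
       let s4 := if pMatch l (Rp 3) && !(s3.contains (Rp 3)) then s3 ++ [Rp 3] else s3
       if pMatch l (Rp 4) && !(s4.contains (Rp 4)) then s4 ++ [Rp 4] else s4) := rfl

theorem stepB_skip (l : String) (seen : List String)
    (h : ∀ i, i < 5 → pMatch l (Rp i) = false) : stepB seen l = seen := by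
  rw [stepB_unfold]
  simp [h 0 (by omega), h 1 (by omega), h 2 (by omega), h 3 (by omega), h 4 (by omega)]

theorem stepB_hit (l : String) (seen : List String) (j : Nat) (hj5 : j < 5)
    (hj : pMatch l (Rp j) = true)
    (ho : ∀ i, i < 5 → i ≠ j → pMatch l (Rp i) = false) :
    stepB seen l = if seen.contains (Rp j) then seen else seen ++ [Rp j] := by
  rw [stepB_unfold]
  interval_cases j
  · simp only [hj, ho 1 (by omega) (by omega), ho 2 (by omega) (by omega),
      ho 3 (by omega) (by omega), ho 4 (by omega) (by omega)]
    simp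
  · simp only [hj, ho 0 (by omega) (by omega), ho 2 (by omega) (by omega),
      ho 3 (by omega) (by omega), ho 4 (by omega) (by omega)]
    simp
  · simp only [hj, ho 0 (by omega) (by omega), ho 1 (by omega) (by omega),
      ho 3 (by omega) (by omega), ho 4 (by omega) (by omega)]
    simp
  · simp only [hj, ho 0 (by omega) (by omega), ho 1 (by omega) (by omega),
      ho 2 (by omega) (by omega), ho 4 (by omega) (by omega)]
    simp
  · simp only [hj, ho 0 (by omega) (by omega), ho 1 (by omega) (by omega),
      ho 2 (by omega) (by omega), ho 3 (by omega) (by omega)]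
    simp

theorem inner_append (l : String) : ∀ (P : List String) (seen : List String),
    ∃ u, P.foldl (fun seen p =>
        if PySem.Str.startswith (PySem.Str.strip l) p && !(seen.contains p)
        then seen ++ [p] else seen) seen = seen ++ u := by
  intro P
  induction P with
  | nil => exact fun seen => ⟨[], (List.append_nil seen).symm⟩
  | cons p ps ihp =>
    intro seen
    rw [List.foldl_cons]
    by_cases hc : (PySem.Str.startswith (PySem.Str.strip l) p && !(seen.contains p)) = true
    · rw [if_pos hc]
      rcases ihp (seen ++ [p]) with ⟨u, hu⟩
      exact ⟨p :: u, by rw [hu]; simp⟩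
    · rw [if_neg hc]
      exact ihp seen

theorem bodyB_append (ls : List String) (seen : List String) :
    ∃ t, bodyB ls seen = seen ++ t := by
  induction ls generalizing seen with
  | nil => exact ⟨[], (List.append_nil seen).symm⟩
  | cons l t ih =>
    rcases inner_append l requiredPrefixes seen with ⟨u, hu⟩
    have hstep : stepB seen l = seen ++ u := hu
    rcases ih (seen ++ u) with ⟨t', ht'⟩
    exact ⟨u ++ t', by simp only [bodyB, List.foldl_cons] at ht' ⊢
                       rw [hstep, ht', List.append_assoc]⟩

theorem isLt_map_iff (a b : Option Nat) :
    isLt (Option.map (· + 1) a) (Option.map (· + 1) b) ↔ isLt a b := by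
  cases a <;> cases b <;> (simp [isLt]; try omega)

theorem isLt_zero_map (b : Option Nat) : isLt (some 0) (Option.map (· + 1) b) := by
  cases b <;> simp [isLt]

theorem FO_inj (ls : List String) (i j n : Nat) (hi : i < 5) (hj : j < 5)
    (h1 : FO (Rp i) ls = some n) (h2 : FO (Rp j) ls = some n) : i = j := by
  obtain ⟨-, hm1⟩ := FO_spec _ _ _ h1
  obtain ⟨-, hm2⟩ := FO_spec _ _ _ h2
  exact pMatch_uniq _ i j hi hj hm1 hm2

theorem ACond_cons_skip (l : String) (ls : List String) (k : Nat)
    (h : ∀ i, k ≤ i → i < 5 → pMatch l (Rp i) = false) :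
    ACond k (l :: ls) ↔ ACond k ls := by
  have hFO : ∀ j, k ≤ j → j < 5 → FO (Rp j) (l :: ls) = (FO (Rp j) ls).map (· + 1) := by
    intro j h1 h2; simp [FO, h j h1 h2]
  unfold ACond
  constructor <;> rintro ⟨hs, ho⟩ <;> refine ⟨fun j h1 h2 => ?_, fun j h1 h2 => ?_⟩
  · have := hs j h1 h2; rw [hFO j h1 h2] at this; simpa using this
  · have := ho j h1 h2
    rw [hFO j h1 (by omega), hFO (j+1) (by omega) (by omega)] at this
    exact (isLt_map_iff _ _).mp this
  · have := hs j h1 h2; rw [hFO j h1 h2]; simpa using this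
  · have := ho j h1 h2
    rw [hFO j h1 (by omega), hFO (j+1) (by omega) (by omega)]
    exact (isLt_map_iff _ _).mpr this

theorem ACond_cons_hit (l : String) (ls : List String) (k : Nat) (_hk : k < 5)
    (hm : pMatch l (Rp k) = true)
    (ho : ∀ i, i < 5 → i ≠ k → pMatch l (Rp i) = false) :
    ACond k (l :: ls) ↔ ACond (k + 1) ls := by
  have hFOk : FO (Rp k) (l :: ls) = some 0 := by simp [FO, hm]
  have hFO : ∀ j, j < 5 → j ≠ k → FO (Rp j) (l :: ls) = (FO (Rp j) ls).map (· + 1) := by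
    intro j h1 h2; simp [FO, ho j h1 h2]
  unfold ACond
  constructor <;> rintro ⟨hs, ho'⟩
  · refine ⟨fun j h1 h2 => ?_, fun j h1 h2 => ?_⟩
    · have := hs j (by omega) h2; rw [hFO j h2 (by omega)] at this; simpa using this
    · have := ho' j (by omega) h2
      rw [hFO j (by omega) (by omega), hFO (j+1) (by omega) (by omega)] at this
      exact (isLt_map_iff _ _).mp this
  · refine ⟨fun j h1 h2 => ?_, fun j h1 h2 => ?_⟩
    · rcases eq_or_lt_of_le h1 with rfl | hlt
      · rw [hFOk]; rfl
      · have := hs j (by omega) h2; rw [hFO j h2 (by omega)]; simpa using this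
    · rcases eq_or_lt_of_le h1 with rfl | hlt
      · rw [hFOk, hFO (k+1) (by omega) (by omega)]
        exact isLt_zero_map _
      · rw [hFO j (by omega) (by omega), hFO (j+1) (by omega) (by omega)]
        exact (isLt_map_iff _ _).mpr (ho' j (by omega) h2)

theorem ACond_cons_over (l : String) (ls : List String) (k j : Nat)
    (hkj : k < j) (hj5 : j < 5) (hm : pMatch l (Rp j) = true)
    (ho : ∀ i, i < 5 → i ≠ j → pMatch l (Rp i) = false) :
    ¬ ACond k (l :: ls) := by
  rintro ⟨hs, ho'⟩
  have hFOj : FO (Rp j) (l :: ls) = some 0 := by simp [FO, hm]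
  have hFOp : FO (Rp (j-1)) (l :: ls) = (FO (Rp (j-1)) ls).map (· + 1) := by
    simp [FO, ho (j-1) (by omega) (by omega)]
  have hsome := hs (j-1) (by omega) (by omega)
  rw [hFOp] at hsome
  rcases Option.isSome_iff_exists.mp (by simpa using hsome) with ⟨m, hmq⟩
  have hlt := ho' (j-1) (by omega) (by omega)
  have hj1 : j - 1 + 1 = j := by omega
  rw [hj1, hFOj, hFOp, hmq] at hlt
  exact absurd (hlt (m+1) 0 (by simp) rfl) (by omega)

-- which required prefix (if any) a line matches
def classify (l : String) : Option Nat :=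
  if pMatch l (Rp 0) then some 0 else if pMatch l (Rp 1) then some 1
  else if pMatch l (Rp 2) then some 2 else if pMatch l (Rp 3) then some 3
  else if pMatch l (Rp 4) then some 4 else none

theorem classify_none (l : String) (h : classify l = none) :
    ∀ i, i < 5 → pMatch l (Rp i) = false := by
  unfold classify at h
  split_ifs at h with h0 h1 h2 h3 h4
  intro i hi
  interval_cases i <;> simp_all

theorem classify_some (l : String) (j : Nat) (h : classify l = some j) :
    j < 5 ∧ pMatch l (Rp j) = true := by
  unfold classify at h
  split_ifs at h with h0 h1 h2 h3 h4 <;> simp_all <;> omega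

theorem classify_others (l : String) (j : Nat) (h : classify l = some j) :
    ∀ i, i < 5 → i ≠ j → pMatch l (Rp i) = false := by
  obtain ⟨hj5, hjm⟩ := classify_some l j h
  intro i hi hne
  by_contra hb
  rw [Bool.not_eq_false] at hb
  exact hne (pMatch_uniq l i j hi hj5 hb hjm)

-- finite facts about the literal prefix list
theorem take_contains_lt : ∀ k < 6, ∀ j < 5, j < k →
    (requiredPrefixes.take k).contains (Rp j) = true := by decide

theorem take_contains_ge : ∀ k < 6, ∀ j < 5, k ≤ j →
    (requiredPrefixes.take k).contains (Rp j) = false := by decide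

theorem take_snoc : ∀ k < 5,
    requiredPrefixes.take k ++ [Rp k] = requiredPrefixes.take (k + 1) := by decide

theorem Rp_injlt : ∀ i < 5, ∀ j < 5, i ≠ j → Rp i ≠ Rp j := by decide

theorem take_len : ∀ k < 6, (requiredPrefixes.take k).length = k := by decide

theorem main_lemma : ∀ (ls : List String) (k : Nat), k ≤ 5 →
    ((bodyB ls (requiredPrefixes.take k) = requiredPrefixes) ↔ ACond k ls) := by
  intro ls
  induction ls with
  | nil =>
    intro k hk
    simp only [bodyB, List.foldl_nil]
    constructor
    · intro h
      have hk5 : k = 5 := by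
        have := congrArg List.length h
        rw [take_len k (by omega)] at this
        simp [requiredPrefixes] at this
        omega
      subst hk5
      exact ⟨fun j h1 h2 => by omega, fun j h1 h2 => by omega⟩
    · rintro ⟨hs, -⟩
      have hk5 : k = 5 := by
        by_contra hne
        have := hs k (le_refl k) (by omega)
        simp [FO] at this
      subst hk5
      simp [requiredPrefixes]
  | cons l t ih =>
    intro k hk
    have hstep : bodyB (l :: t) (requiredPrefixes.take k)
        = bodyB t (stepB (requiredPrefixes.take k) l) := by
      simp only [bodyB, List.foldl_cons]
    cases hcl : classify l with
    | none =>
      have hno := classify_none l hcl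
      rw [hstep, stepB_skip l _ hno,
        ACond_cons_skip l t k (fun i _ h2 => hno i h2)]
      exact ih k hk
    | some j =>
      obtain ⟨hj5, hjm⟩ := classify_some l j hcl
      have ho := classify_others l j hcl
      rcases lt_trichotomy j k with hlt | heq | hgt
      · rw [hstep, stepB_hit l _ j hj5 hjm ho,
          if_pos (take_contains_lt k (by omega) j hj5 hlt),
          ACond_cons_skip l t k (fun i h1 h2 => ho i h2 (by omega))]
        exact ih k hk
      · subst heq
        rw [hstep, stepB_hit l _ j hj5 hjm ho,
          if_neg (by simpa using take_contains_ge j (by omega) j hj5 (le_refl j)),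
          take_snoc j hj5, ACond_cons_hit l t j hj5 hjm ho]
        exact ih (j + 1) (by omega)
      · refine iff_of_false ?_ (ACond_cons_over l t k j hgt hj5 hjm ho)
        rw [hstep, stepB_hit l _ j hj5 hjm ho,
          if_neg (by simpa using take_contains_ge k (by omega) j hj5 (by omega))]
        intro heq
        rcases bodyB_append t (requiredPrefixes.take k ++ [Rp j]) with ⟨u, hu⟩
        rw [hu] at heq
        have hlen : (requiredPrefixes.take k ++ [Rp j]).length = k + 1 := by
          rw [List.length_append, take_len k (by omega)]; rfl
        have htk := congrArg (List.take (k + 1)) heq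
        rw [List.take_append_of_le_length (by omega),
          List.take_of_length_le (by omega)] at htk
        rw [← take_snoc k (by omega)] at htk
        have : Rp j = Rp k := by
          have := List.append_cancel_left htk
          simpa using this
        exact Rp_injlt j hj5 k (by omega) (by omega) this

set_option maxHeartbeats 1000000 in
theorem A_iff (block : String) :
    (block_has_valid_terminal_structure block = true)
      ↔ ACond 0 (PySem.Str.splitlines block) := by
  have hA : block_has_valid_terminal_structure block =
      (let idx : List Int :=
        [find_block_line_index (PySem.Str.splitlines block) (Rp 0),
         find_block_line_index (PySem.Str.splitlines block) (Rp 1),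
         find_block_line_index (PySem.Str.splitlines block) (Rp 2),
         find_block_line_index (PySem.Str.splitlines block) (Rp 3),
         find_block_line_index (PySem.Str.splitlines block) (Rp 4)]
       if idx.any (fun i => i < 0) then false
       else idx == PySem.List.sorted idx (fun x => x) false) := rfl
  rw [hA]
  simp only [find_eq_FO]
  generalize PySem.Str.splitlines block = L
  cases h0 : FO (Rp 0) L with
  | none =>
    refine iff_of_false ?_ (fun hc => by have := hc.1 0 (by omega) (by omega); rw [h0] at this; simp at this)
    simp
  | some n0 =>
  cases h1 : FO (Rp 1) L with
  | none =>
    refine iff_of_false ?_ (fun hc => by have := hc.1 1 (by omega) (by omega); rw [h1] at this; simp at this)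
    simp
  | some n1 =>
  cases h2 : FO (Rp 2) L with
  | none =>
    refine iff_of_false ?_ (fun hc => by have := hc.1 2 (by omega) (by omega); rw [h2] at this; simp at this)
    simp
  | some n2 =>
  cases h3 : FO (Rp 3) L with
  | none =>
    refine iff_of_false ?_ (fun hc => by have := hc.1 3 (by omega) (by omega); rw [h3] at this; simp at this)
    simp
  | some n3 =>
  cases h4 : FO (Rp 4) L with
  | none =>
    refine iff_of_false ?_ (fun hc => by have := hc.1 4 (by omega) (by omega); rw [h4] at this; simp at this)
    simp
  | some n4 =>
  rw [if_neg (by simp)]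
  rw [beq_iff_eq]
  have hadj : ∀ a na nb, a < 4 → FO (Rp a) L = some na → FO (Rp (a+1)) L = some nb →
      na ≤ nb → na < nb := by
    intro a na nb ha hfa hfb hle
    rcases Nat.eq_or_lt_of_le hle with he | h
    · subst he
      exact absurd (FO_inj L a (a+1) na (by omega) (by omega) hfa hfb) (by omega)
    · exact h
  constructor
  · intro heq
    have hp : List.Pairwise (fun a b : Int => a ≤ b)
        [(n0 : Int), (n1 : Int), (n2 : Int), (n3 : Int), (n4 : Int)] := by
      rw [heq]
      exact PySem.List.sorted_pairwise _ _
    have hch := List.isChain_iff_pairwise.mpr hp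
    simp only [List.isChain_cons_cons, List.IsChain.singleton, and_true] at hch
    obtain ⟨c01, c12, c23, c34⟩ := hch
    have h01 : n0 < n1 := hadj 0 n0 n1 (by omega) h0 h1 (by exact_mod_cast c01)
    have h12 : n1 < n2 := hadj 1 n1 n2 (by omega) h1 h2 (by exact_mod_cast c12)
    have h23 : n2 < n3 := hadj 2 n2 n3 (by omega) h2 h3 (by exact_mod_cast c23)
    have h34 : n3 < n4 := hadj 3 n3 n4 (by omega) h3 h4 (by exact_mod_cast c34)
    constructor
    · intro j _ hj
      interval_cases j <;> simp [h0, h1, h2, h3, h4]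
    · intro j _ hj
      have hj4 : j < 4 := by omega
      interval_cases j <;>
        (intro m n hm hn) <;>
        simp only [h0, h1, h2, h3, h4, Option.some.injEq] at hm hn <;> omega
  · rintro ⟨-, ho⟩
    have h01 : n0 < n1 := ho 0 (by omega) (by omega) n0 n1 h0 h1
    have h12 : n1 < n2 := ho 1 (by omega) (by omega) n1 n2 h1 h2
    have h23 : n2 < n3 := ho 2 (by omega) (by omega) n2 n3 h2 h3
    have h34 : n3 < n4 := ho 3 (by omega) (by omega) n3 n4 h3 h4
    have hpw : List.Pairwise (fun a b : Int => a ≤ b)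
        [(n0 : Int), (n1 : Int), (n2 : Int), (n3 : Int), (n4 : Int)] := by
      refine List.isChain_iff_pairwise.mp ?_
      simp only [List.isChain_cons_cons, List.IsChain.singleton, and_true]
      refine ⟨?_, ?_, ?_, ?_⟩ <;> (show (_ : Int) ≤ _; omega)
    exact (PySem.List.sorted_eq_self_of_pairwise _ _ hpw).symm

theorem block_has_valid_terminal_structure_spec : Claim_equal_block_has_valid_terminal_structure := by
  intro block _
  unfold Spec_block_has_valid_terminal_structure
  rw [Bool.eq_iff_iff, A_iff, alt_eq_bodyB, beq_iff_eq]
  exact (main_lemma (PySem.Str.splitlines block) 0 (by omega)).symm
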